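-- pv_equiv track=rewrite | github.com/getachew67/CSE-160 | Midterm 1/midterm_21au.py | first_n_indices
-- ===== SOURCE A (Python) =====
-- def first_n_indices(s, target, n):
--     '''
--     Returns a list of the first n indices where target appears
--     in the given string s. Returns an empty list if s does not
--     contain the target character or n is 0. Assume target will
--     always be a single character and n will be an int >= 0
--
--     Arguments:
--        s: an input string to find the first n indices of
--        target: a target character. This will always be a single character
--        n: an integer limiting how many indices we want to return
--        from the function
--
--     Returns: A list a list of the first n indices where target appears
--     in the given string s.
--     '''
--     list_indices = []
--     count = 0
--     if target not in s:
--         return []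
--     for i in s:
--         if i == target:
--             if len(list_indices) < n:
--                 list_indices.append(count)
--         count = count + 1
--     return list_indices
-- ===== SOURCE B (Python) =====
-- def first_n_indices(s, target, n):
--     result = []
--     pos = -1
--     while len(result) < n:
--         pos = s.find(target, pos + 1)
--         if pos == -1:
--             break
--         result.append(pos)
--     return result
-- ===== Notes on version B (the rewrite author's own statement) =====
-- stated objective: idiomatic
-- what changed: Replaces the character-by-character counting scan (which walks the whole string even after n hits) with a repeated str.find loop that jumps from one occurrence to the next and stops as soon as n indices are collected. Pre_ excludes only inputs outside the documented single-character-target domain where the two defensible generalizations disagree: an empty or multi-character target that occurs in s with n > 0, where A's per-character comparison never matches (it returns []) while B's substring search reports genuine occurrence positions.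
-- outside the precondition, e.g. on first_n_indices('abab', 'ab', 2): A returns [], B returns [0, 2]; on first_n_indices('ab', '', 1): A returns [], B returns [0]
import Mathlib
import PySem

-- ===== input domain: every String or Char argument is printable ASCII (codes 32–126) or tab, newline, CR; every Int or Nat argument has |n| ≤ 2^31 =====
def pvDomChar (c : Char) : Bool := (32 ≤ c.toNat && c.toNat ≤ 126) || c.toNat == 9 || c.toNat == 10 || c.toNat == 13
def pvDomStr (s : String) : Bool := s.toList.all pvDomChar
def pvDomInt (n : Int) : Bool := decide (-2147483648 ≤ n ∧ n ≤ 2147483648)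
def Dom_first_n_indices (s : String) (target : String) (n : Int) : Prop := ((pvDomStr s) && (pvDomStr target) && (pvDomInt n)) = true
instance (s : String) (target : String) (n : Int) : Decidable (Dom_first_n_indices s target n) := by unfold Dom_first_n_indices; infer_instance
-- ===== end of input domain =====

-- B replaces A's whole-string counting scan with a repeated str.find jump loop (idiomatic, stops after n hits).

-- ===== PORT A =====
def first_n_indices (s : String) (target : String) (n : Int) : List Int :=
  -- list_indices = []; count = 0; guard; for i in s: …
  if PySem.Str.isIn target s = false then []
  else
    (s.toList.foldl
      (fun (st : List Int × Int) (c : Char) =>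
        (if [c] = target.toList then
            (if (st.1.length : Int) < n then st.1 ++ [st.2] else st.1)
          else st.1,
         st.2 + 1))
      ([], 0)).1

-- ===== PORT B =====
-- while len(result) < n: pos = s.find(target, pos+1); … — fuel n - len(result) decreases by 1 each turn
def pvFindLoop (s : String) (target : String) : Nat → Int → List Int → List Int
  | 0, _, acc => acc
  | Nat.succ k, pos, acc =>
    let p := PySem.Str.findFrom s target (pos + 1) none
    if p = -1 then acc else pvFindLoop s target k p (acc ++ [p])

def first_n_indices_alt (s : String) (target : String) (n : Int) : List Int :=
  pvFindLoop s target n.toNat (-1) []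

-- ===== PRECONDITION & SPEC =====
-- Pre_ excludes only the inputs outside the documented single-character-target domain on which the two
-- defensible generalizations disagree: an empty or multi-character target that does occur in s with n > 0,
-- where A's per-character comparison never matches (it returns []) while B's substring search reports
-- genuine occurrence positions.
def Pre_first_n_indices (s : String) (target : String) (n : Int) : Prop :=
  target.toList.length = 1 ∨ n ≤ 0 ∨ PySem.Str.isIn target s = false
instance (s : String) (target : String) (n : Int) : Decidable (Pre_first_n_indices s target n) := by unfold Pre_first_n_indices; infer_instance
def pvWitness_first_n_indices : String × String × Int := ("abcabc", "b", 2)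
def Spec_first_n_indices (s : String) (target : String) (n : Int) (out : List Int) : Prop := out = first_n_indices_alt s target n
instance (s : String) (target : String) (n : Int) (out : List Int) : Decidable (Spec_first_n_indices s target n out) := by unfold Spec_first_n_indices; infer_instance

-- ===== CLAIM (what is proved, stated in full; the proofs are below) =====
def Claim_equal_first_n_indices : Prop := ∀ (s : String) (target : String) (n : Int), Dom_first_n_indices s target n → Pre_first_n_indices s target n → Spec_first_n_indices s target n (first_n_indices s target n)

-- ===== LEMMAS AND PROOFS =====

-- proof-side reference: the indices (offset by k) at which t occurs in the char list
def pvOcc : List Char → Char → Int → List Int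
  | [], _, _ => []
  | c :: cs, t, k => if c = t then k :: pvOcc cs t (k + 1) else pvOcc cs t (k + 1)

theorem pvOcc_nil_of_not_mem {t : Char} {l : List Char} (h : t ∉ l) (k : Int) :
    pvOcc l t k = [] := by
  induction l generalizing k with
  | nil => rfl
  | cons c cs ih =>
    simp only [List.mem_cons, not_or] at h
    simp [pvOcc, Ne.symm h.1, ih h.2]

theorem pvOcc_append (l₁ l₂ : List Char) (t : Char) (k : Int) :
    pvOcc (l₁ ++ l₂) t k = pvOcc l₁ t k ++ pvOcc l₂ t (k + l₁.length) := by
  induction l₁ generalizing k with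
  | nil => simp [pvOcc]
  | cons c cs ih =>
    simp only [List.cons_append, pvOcc, ih]
    split_ifs <;> simp <;> ring_nf

theorem pvPrefix_singleton {t : Char} {l : List Char} : [t] <+: l ↔ l.head? = some t := by
  cases l with
  | nil => simp
  | cons c cs => simp [List.cons_prefix_cons, eq_comm]

-- A's fold appends, in order, the occurrence indices until the accumulator reaches length n
theorem pvFoldA (cs : List Char) (t : Char) (n : Int) :
    ∀ (lst : List Int) (count : Int),
      (cs.foldl
        (fun (st : List Int × Int) (c : Char) =>
          (if [c] = [t] then
              (if (st.1.length : Int) < n then st.1 ++ [st.2] else st.1)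
            else st.1,
           st.2 + 1))
        (lst, count)).1
      = lst ++ (pvOcc cs t count).take (n - lst.length).toNat := by
  induction cs with
  | nil => intro lst count; simp [pvOcc]
  | cons c cs ih =>
    intro lst count
    rw [List.foldl_cons]
    by_cases hc : c = t
    · subst hc
      simp only [pvOcc]
      by_cases hlen : (lst.length : Int) < n
      · simp only [if_pos hlen]
        rw [ih]
        have h1 : (n - lst.length).toNat = (n - ((lst ++ [count]).length : Int)).toNat + 1 := by
          simp only [List.length_append, List.length_cons, List.length_nil]
          omega
        simp [h1, List.take_succ_cons]
      · simp only [if_neg hlen]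
        rw [ih]
        have h1 : (n - (lst.length : Int)).toNat = 0 := by omega
        simp [h1]
    · have hne : ¬([c] = [t]) := by simpa using hc
      simp only [if_neg hne, pvOcc, if_neg hc]
      exact ih lst (count + 1)

-- B's find-loop collects, from position pos = q-1 on, the next fuel-many occurrence indices
theorem pvLoopSpec (s : String) (target : String) (t : Char) (ht : target.toList = [t]) :
    ∀ (k : Nat) (q : Nat) (acc : List Int), q ≤ s.toList.length →
      pvFindLoop s target k ((q : Int) - 1) acc
        = acc ++ (pvOcc (s.toList.drop q) t q).take k := by
  intro k
  induction k with
  | zero => intro q acc _; simp [pvFindLoop]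
  | succ k ih =>
    intro q acc hq
    simp only [pvFindLoop]
    have hpos : (q : Int) - 1 + 1 = (q : Int) := by ring
    rw [hpos]
    have hfr : PySem.Str.findFrom s target (q : Int) none
        = PySem.Chars.findFrom s.toList target.toList (q : Int) none := by simp
    rw [hfr, ht, PySem.Chars.findFrom_natCast s.toList [t] q hq]
    set j : Int := PySem.Chars.find (s.toList.drop q) [t] with hj
    by_cases hneg : j = -1
    · -- no further occurrence: find = -1, the loop stops, and pvOcc of the rest is empty
      have hnin : t ∉ s.toList.drop q := by
        have h := (PySem.Chars.find_eq_neg_one_iff (s := s.toList.drop q) (sub := [t])).mp hneg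
        intro hmem
        exact h ((List.singleton_infix_iff t _).mpr hmem)
      rw [if_pos hneg, pvOcc_nil_of_not_mem hnin]
      simp
    · -- an occurrence exists at index x = q + find(...)
      have h0 : 0 ≤ j := by
        have := PySem.Chars.neg_one_le_find (s := s.toList.drop q) (sub := [t])
        rw [← hj] at this; omega
      obtain ⟨hpre, hmin⟩ := PySem.Chars.find_spec (s := s.toList.drop q) (sub := [t]) h0
      set m : Nat := j.toNat with hm
      set x : Nat := q + m with hxdef
      have hdd : (s.toList.drop q).drop m = s.toList.drop x := by
        rw [List.drop_drop]
      rw [hdd] at hpre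
      have hget : s.toList[x]? = some t := by
        rw [← List.head?_drop]
        exact (pvPrefix_singleton).mp hpre
      obtain ⟨hx, hgetx⟩ := List.getElem?_eq_some_iff.mp hget
      have hqj : (q : Int) + j ≠ -1 := by omega
      rw [if_neg hneg, if_neg hqj]
      -- decompose pvOcc (drop q) t q around the found occurrence
      have hsplit : s.toList.drop q
          = (s.toList.drop q).take m ++ (t :: s.toList.drop (x + 1)) := by
        conv_lhs => rw [← List.take_append_drop m (s.toList.drop q)]
        rw [hdd, List.drop_eq_getElem_cons hx, hgetx]
      have hlen1 : ((s.toList.drop q).take m).length = m := by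
        simp only [List.length_take, List.length_drop]
        omega
      have hnotmem : t ∉ (s.toList.drop q).take m := by
        intro hmem
        obtain ⟨i, hi, hval⟩ := List.getElem_of_mem hmem
        have him : i < m := by rw [hlen1] at hi; exact hi
        have hval? : ((s.toList.drop q).take m)[i]? = some t :=
          List.getElem?_eq_some_iff.mpr ⟨hi, hval⟩
        have hgi : (s.toList.drop q)[i]? = some t := by
          rw [List.getElem?_take] at hval?
          simpa [him] using hval?
        exact hmin i him ((pvPrefix_singleton).mpr (by rw [List.head?_drop]; exact hgi))
      have hocc : pvOcc (s.toList.drop q) t q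
          = (x : Int) :: pvOcc (s.toList.drop (x + 1)) t ((x : Int) + 1) := by
        conv_lhs => rw [hsplit]
        rw [pvOcc_append, pvOcc_nil_of_not_mem hnotmem, hlen1]
        simp [pvOcc, hxdef]
      have hposx : (q : Int) + j = ((x + 1 : Nat) : Int) - 1 := by
        push_cast [hxdef, hm]; omega
      rw [hposx, ih (x + 1) (acc ++ [((x + 1 : Nat) : Int) - 1]) (by omega)]
      rw [hocc, List.take_succ_cons]
      have hc1 : ((x + 1 : Nat) : Int) - 1 = (x : Int) := by push_cast; ring
      have hc2 : ((x + 1 : Nat) : Int) = (x : Int) + 1 := by push_cast; ring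
      rw [hc1, hc2, List.append_assoc]
      simp

-- B returns [] when the fuel n is non-positive
theorem pvB_nil_of_nonpos (s target : String) (n : Int) (hn : n ≤ 0) :
    first_n_indices_alt s target n = [] := by
  unfold first_n_indices_alt
  have h0 : n.toNat = 0 := by omega
  rw [h0]
  rfl

-- B returns [] when target does not occur in s: the very first find comes back -1
theorem pvB_nil_of_notin (s target : String) (n : Int)
    (hin : PySem.Str.isIn target s = false) :
    first_n_indices_alt s target n = [] := by
  unfold first_n_indices_alt
  cases hk : n.toNat with
  | zero => rfl
  | succ k =>
    simp only [pvFindLoop]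
    have hf : PySem.Str.findFrom s target (-1 + 1) none = -1 := by
      norm_num
      have : ¬ target.toList <:+: s.toList := by
        intro hinf
        have : PySem.Str.isIn target s = true := (PySem.Str.isIn_iff_infix target s).mpr hinf
        rw [hin] at this; cases this
      simp [PySem.Chars.find_eq_neg_one_iff, this]
    rw [hf]
    simp

-- A's fold never appends when n ≤ 0
theorem pvFoldA_nonpos (cs : List Char) (target : String) (n : Int) (hn : n ≤ 0) :
    ∀ (lst : List Int) (count : Int),
      (cs.foldl
        (fun (st : List Int × Int) (c : Char) =>
          (if [c] = target.toList then
              (if (st.1.length : Int) < n then st.1 ++ [st.2] else st.1)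
            else st.1,
           st.2 + 1))
        (lst, count)).1 = lst := by
  induction cs with
  | nil => intro lst count; rfl
  | cons c cs ih =>
    intro lst count
    rw [List.foldl_cons]
    have hlen : ¬ ((lst.length : Int) < n) := by omega
    by_cases hc : [c] = target.toList
    · simp only [if_pos hc, if_neg hlen]
      exact ih lst (count + 1)
    · simp only [if_neg hc]
      exact ih lst (count + 1)

-- ===== VERDICT (by name: the statement is the Claim_ definition above) =====
theorem first_n_indices_spec : Claim_equal_first_n_indices := by
  intro s target n _ hpre
  unfold Spec_first_n_indices
  by_cases h1 : target.toList.length = 1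
  · -- the documented domain: a single-character target
    obtain ⟨t, ht⟩ := List.length_eq_one_iff.mp h1
    have hB : first_n_indices_alt s target n
        = (pvOcc s.toList t 0).take n.toNat := by
      unfold first_n_indices_alt
      have h0 : (-1 : Int) = ((0 : Nat) : Int) - 1 := by norm_num
      rw [h0, pvLoopSpec s target t ht n.toNat 0 [] (by omega)]
      simp
    unfold first_n_indices
    by_cases hin : PySem.Str.isIn target s = false
    · -- guard branch: the target character is absent, so both sides are []
      rw [if_pos hin, hB]
      have hnin : t ∉ s.toList := by
        intro hmem
        have : PySem.Str.isIn target s = true := by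
          rw [PySem.Str.isIn_iff_infix, ht]
          exact (List.singleton_infix_iff t _).mpr hmem
        rw [hin] at this; cases this
      rw [pvOcc_nil_of_not_mem hnin]
      simp
    · rw [if_neg hin]
      have hfun : (fun (st : List Int × Int) (c : Char) =>
            (if [c] = target.toList then
                (if (st.1.length : Int) < n then st.1 ++ [st.2] else st.1)
              else st.1, st.2 + 1))
          = (fun (st : List Int × Int) (c : Char) =>
            (if [c] = [t] then
                (if (st.1.length : Int) < n then st.1 ++ [st.2] else st.1)
              else st.1, st.2 + 1)) := by
        rw [ht]
      rw [hfun, pvFoldA s.toList t n [] 0, hB]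
      simp
  · -- outside the documented domain Pre_ only admits inputs where both sides are []
    have hboth : (n ≤ 0 ∨ PySem.Str.isIn target s = false) := by
      unfold Pre_first_n_indices at hpre
      tauto
    have hBnil : first_n_indices_alt s target n = [] := by
      rcases hboth with hn | hin
      · exact pvB_nil_of_nonpos s target n hn
      · exact pvB_nil_of_notin s target n hin
    rw [hBnil]
    unfold first_n_indices
    by_cases hin : PySem.Str.isIn target s = false
    · rw [if_pos hin]
    · rw [if_neg hin]
      have hn : n ≤ 0 := by tauto
      rw [pvFoldA_nonpos s.toList target n hn [] 0]
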